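-- pv_equiv track=rewrite | github.com/vgraeber/adventofcode | 2023/day10/part2.py | getcolsonly
-- ===== SOURCE A (Python) =====
-- def getcolsonly(pipeloop, endrow):
--   newpipeloop = []
--   for row in range(endrow):
--     rowgroup = []
--     for pipe in pipeloop:
--       if (pipe[0] == row):
--         rowgroup.append(pipe[1])
--     newpipeloop.append(rowgroup)
--   return newpipeloop
-- ===== SOURCE B (Python) =====
-- def getcolsonly(pipeloop, endrow):
--   buckets = [[] for _ in range(endrow)]
--   for r, c in pipeloop:
--     if 0 <= r < endrow:
--       buckets[r].append(c)
--   return buckets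
-- ===== Notes on version B (the rewrite author's own statement) =====
-- stated objective: faster
-- what changed: Instead of scanning the whole pipe list once per row (nested loops), B preallocates one empty bucket per row and distributes each pipe into its row's bucket in a single pass.
import Mathlib
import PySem

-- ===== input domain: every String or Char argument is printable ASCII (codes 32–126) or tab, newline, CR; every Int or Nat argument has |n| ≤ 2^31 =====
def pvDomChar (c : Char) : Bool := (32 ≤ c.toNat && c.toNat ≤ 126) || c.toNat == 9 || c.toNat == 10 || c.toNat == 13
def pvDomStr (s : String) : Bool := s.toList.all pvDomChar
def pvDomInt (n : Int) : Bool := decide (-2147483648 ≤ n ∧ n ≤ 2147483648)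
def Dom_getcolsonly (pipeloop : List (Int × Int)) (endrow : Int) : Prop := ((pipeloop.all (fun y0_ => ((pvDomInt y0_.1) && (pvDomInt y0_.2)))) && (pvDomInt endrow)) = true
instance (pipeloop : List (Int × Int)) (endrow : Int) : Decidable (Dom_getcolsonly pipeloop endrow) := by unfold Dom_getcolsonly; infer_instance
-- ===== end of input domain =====

-- B replaces A's per-row rescans of the pipe list by a single bucketing pass (faster, asymptotic change).

-- ===== PORT A =====
-- for row in range(endrow): rowgroup = [pipe[1] for pipe in pipeloop if pipe[0]==row]; newpipeloop.append(rowgroup)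
def getcolsonly (pipeloop : List (Int × Int)) (endrow : Int) : List (List Int) :=
  (PySem.List.pyRange 0 endrow 1).foldl
    (fun newpipeloop row =>
      newpipeloop ++
        [pipeloop.foldl (fun rowgroup pipe =>
          if pipe.1 == row then rowgroup ++ [pipe.2] else rowgroup) []])
    []

-- ===== PORT B =====
-- buckets = [[] for _ in range(endrow)]; for r, c in pipeloop: if 0 <= r < endrow: buckets[r].append(c)
def getcolsonly_alt (pipeloop : List (Int × Int)) (endrow : Int) : List (List Int) :=
  pipeloop.foldl
    (fun buckets p =>
      if 0 ≤ p.1 ∧ p.1 < endrow then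
        buckets.set p.1.toNat (buckets.getD p.1.toNat [] ++ [p.2])
      else buckets)
    (List.replicate endrow.toNat [])

-- ===== PRECONDITION & SPEC =====
def Spec_getcolsonly (pipeloop : List (Int × Int)) (endrow : Int) (out : List (List Int)) : Prop := out = getcolsonly_alt pipeloop endrow
instance (pipeloop : List (Int × Int)) (endrow : Int) (out : List (List Int)) : Decidable (Spec_getcolsonly pipeloop endrow out) := by unfold Spec_getcolsonly; infer_instance

-- ===== CLAIM (what is proved, stated in full; the proofs are below) =====
def Claim_equal_getcolsonly : Prop := ∀ (pipeloop : List (Int × Int)) (endrow : Int), Dom_getcolsonly pipeloop endrow → Spec_getcolsonly pipeloop endrow (getcolsonly pipeloop endrow)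

-- ===== LEMMAS AND PROOFS =====

-- B's fold keeps the buckets' length.
theorem alt_fold_length (endrow : Int) (l : List (Int × Int)) (bs : List (List Int)) :
    (l.foldl (fun buckets p =>
      if 0 ≤ p.1 ∧ p.1 < endrow then
        buckets.set p.1.toNat (buckets.getD p.1.toNat [] ++ [p.2])
      else buckets) bs).length = bs.length := by
  induction l generalizing bs with
  | nil => rfl
  | cons p l ih =>
    simp only [List.foldl_cons]
    rw [ih]
    split <;> simp

-- Invariant for B's fold: entry i accumulates exactly the second components of the
-- pipes whose first component equals i.
theorem alt_fold_getD (endrow : Int) (l : List (Int × Int)) :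
    ∀ (bs : List (List Int)), bs.length = endrow.toNat → ∀ (i : Nat), i < endrow.toNat →
    (l.foldl (fun buckets p =>
      if 0 ≤ p.1 ∧ p.1 < endrow then
        buckets.set p.1.toNat (buckets.getD p.1.toNat [] ++ [p.2])
      else buckets) bs).getD i [] =
    bs.getD i [] ++ (l.filter (fun p => p.1 == (i : Int))).map Prod.snd := by
  induction l with
  | nil => intro bs _ i _; simp
  | cons p l ih =>
    intro bs hbs i hi
    simp only [List.foldl_cons]
    by_cases hc : 0 ≤ p.1 ∧ p.1 < endrow
    · rw [if_pos hc]
      have hlen : (bs.set p.1.toNat (bs.getD p.1.toNat [] ++ [p.2])).length = endrow.toNat := by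
        simp [hbs]
      rw [ih _ hlen i hi]
      by_cases heq : p.1 = (i : Int)
      · have hnat : p.1.toNat = i := by omega
        have hget : (bs.set p.1.toNat (bs.getD p.1.toNat [] ++ [p.2])).getD i [] =
            bs.getD p.1.toNat [] ++ [p.2] := by
          rw [← hnat]
          have : p.1.toNat < bs.length := by omega
          simp [List.getD, List.getElem?_set_self', List.getElem?_eq_getElem this]
        rw [hget, hnat]
        simp [heq]
      · have hnat : p.1.toNat ≠ i := by omega
        have hget : (bs.set p.1.toNat (bs.getD p.1.toNat [] ++ [p.2])).getD i [] =
            bs.getD i [] := by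
          simp [List.getD, List.getElem?_set_ne hnat]
        rw [hget]
        simp [heq]
    · rw [if_neg hc]
      rw [ih _ hbs i hi]
      have heq : ¬ (p.1 = (i : Int)) := by
        intro h
        apply hc
        constructor
        · omega
        · have : (i : Int) < endrow := by omega
          omega
      simp [heq]

-- A's value, row by row.
theorem a_eq_map (pipeloop : List (Int × Int)) (endrow : Int) :
    getcolsonly pipeloop endrow =
      (PySem.List.pyRange 0 endrow 1).map
        (fun row => (pipeloop.filter (fun p => p.1 == row)).map Prod.snd) := by
  unfold getcolsonly
  have h : ∀ (rows : List Int) (acc : List (List Int)),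
      rows.foldl (fun newpipeloop row =>
        newpipeloop ++
          [pipeloop.foldl (fun rowgroup pipe =>
            if pipe.1 == row then rowgroup ++ [pipe.2] else rowgroup) []]) acc =
      acc ++ rows.map (fun row => (pipeloop.filter (fun p => p.1 == row)).map Prod.snd) := by
    intro rows
    induction rows with
    | nil => intro acc; simp
    | cons r rs ih =>
      intro acc
      simp only [List.foldl_cons, List.map_cons]
      rw [ih, PySem.List.foldl_append_if (fun p => p.1 == r) Prod.snd pipeloop []]
      simp
  rw [h]
  simp

theorem getcolsonly_eq_alt (pipeloop : List (Int × Int)) (endrow : Int) :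
    getcolsonly pipeloop endrow = getcolsonly_alt pipeloop endrow := by
  rw [a_eq_map]
  have hlen : (getcolsonly_alt pipeloop endrow).length = endrow.toNat := by
    unfold getcolsonly_alt
    rw [alt_fold_length]
    simp
  apply List.ext_getElem
  · simp [PySem.List.length_pyRange_one, hlen]
  · intro i h1 h2
    have hi : i < endrow.toNat := by
      simpa [PySem.List.length_pyRange_one] using h1
    have hget : (getcolsonly_alt pipeloop endrow)[i] =
        (getcolsonly_alt pipeloop endrow).getD i [] := by
      rw [List.getD_eq_getElem _ _ h2]
    rw [hget]
    unfold getcolsonly_alt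
    rw [alt_fold_getD endrow pipeloop (List.replicate endrow.toNat []) (by simp) i hi]
    simp only [List.getElem_map]
    rw [PySem.List.getElem_pyRange_one]
    simp

-- ===== VERDICT (by name: the statement is the Claim_ definition above) =====
theorem getcolsonly_spec : Claim_equal_getcolsonly := by
  intro pipeloop endrow _
  exact getcolsonly_eq_alt pipeloop endrow
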